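-- pv_equiv track=rewrite | github.com/Saihgax/Python-Scripts | Linux Based/detecyMemoryLeakServer.py | detect_memory_leak
-- ===== SOURCE A (Python) =====
-- def detect_memory_leak(logs):
--     count = 0
--     for i in range(1, len(logs)):
--         prev = logs[i-1]
--         curr = logs[i]
--
--         if prev["memory_usage"] < curr["memory_usage"]:
--             count += 1
--         else:
--             count = 0
--
--     if count >=3:
--         return True
--     return False
-- ===== SOURCE B (Python) =====
-- def detect_memory_leak(logs):
--     # A only inspects its counter after the whole scan, so it returns True iff
--     # the trailing run of strict increases is >= 3, i.e. iff the last four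
--     # memory_usage values strictly increase.  Short lists never touch any entry.
--     if len(logs) < 4:
--         return False
--     a, b, c, d = logs[-4:]
--     return (a["memory_usage"] < b["memory_usage"]
--             < c["memory_usage"] < d["memory_usage"])
-- ===== Notes on version B (the rewrite author's own statement) =====
-- stated objective: simpler
-- what changed: Replaces A's whole-list counter loop by a closed-form tail check: return False for fewer than four entries, otherwise test whether the last four memory_usage values strictly increase (equivalent because A only reads its counter after the loop ends).
import Mathlib
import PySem

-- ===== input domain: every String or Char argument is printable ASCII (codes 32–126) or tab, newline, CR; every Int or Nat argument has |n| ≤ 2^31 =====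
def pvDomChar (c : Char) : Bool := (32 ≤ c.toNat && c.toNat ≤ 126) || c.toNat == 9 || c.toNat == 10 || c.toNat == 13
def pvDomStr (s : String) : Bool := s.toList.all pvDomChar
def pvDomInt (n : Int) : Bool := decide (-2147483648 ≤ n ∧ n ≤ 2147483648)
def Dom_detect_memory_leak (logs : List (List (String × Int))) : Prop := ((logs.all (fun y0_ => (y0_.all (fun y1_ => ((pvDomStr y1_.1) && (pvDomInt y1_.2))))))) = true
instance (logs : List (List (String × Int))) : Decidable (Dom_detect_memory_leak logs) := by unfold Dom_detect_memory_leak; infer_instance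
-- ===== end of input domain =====

-- B replaces A's counter loop by a closed-form tail check: False for fewer than
-- four entries, otherwise the last four memory_usage values strictly increase
-- (equivalent: A only reads its counter after the loop ends).

-- d["memory_usage"] with default 0; inside Pre_ every accessed entry has the key, so exact there
def pvMu (d : List (String × Int)) : Int := (PySem.Dict.mk d).getD "memory_usage" 0

-- ===== PORT A =====
def detect_memory_leak (logs : List (List (String × Int))) : Bool :=
  let count : Int := (PySem.List.pyRange 1 logs.length 1).foldl
    (fun count i =>
      let prev := PySem.List.pyGetD logs (i - 1) []
      let curr := PySem.List.pyGetD logs i []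
      if pvMu prev < pvMu curr then count + 1 else 0) 0
  if count ≥ 3 then true else false

-- ===== PORT B =====
def detect_memory_leak_alt (logs : List (List (String × Int))) : Bool :=
  if logs.length < 4 then false
  else
    match PySem.List.slice logs (some (-4)) none with
    | [a, b, c, d] =>
        decide (pvMu a < pvMu b) && decide (pvMu b < pvMu c) && decide (pvMu c < pvMu d)
    | _ => false

-- ===== PRECONDITION & SPEC =====
-- Pre_ excludes exactly the inputs on which the Python A raises KeyError:
-- lists of length ≥ 2 containing an entry that lacks the "memory_usage" key.
def Pre_detect_memory_leak (logs : List (List (String × Int))) : Prop :=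
  logs.length < 2 ∨ ∀ d ∈ logs, (PySem.Dict.mk d).contains "memory_usage" = true
instance (logs : List (List (String × Int))) : Decidable (Pre_detect_memory_leak logs) := by unfold Pre_detect_memory_leak; infer_instance

def pvWitness_detect_memory_leak : (List (List (String × Int))) :=
  [[("memory_usage", 1)], [("memory_usage", 2)], [("memory_usage", 3)], [("memory_usage", 4)]]

def Spec_detect_memory_leak (logs : List (List (String × Int))) (out : Bool) : Prop := out = detect_memory_leak_alt logs
instance (logs : List (List (String × Int))) (out : Bool) : Decidable (Spec_detect_memory_leak logs out) := by unfold Spec_detect_memory_leak; infer_instance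

-- ===== CLAIM (what is proved, stated in full; the proofs are below) =====
def Claim_equal_detect_memory_leak : Prop := ∀ (logs : List (List (String × Int))), Dom_detect_memory_leak logs → Pre_detect_memory_leak logs → Spec_detect_memory_leak logs (detect_memory_leak logs)

-- ===== LEMMAS AND PROOFS =====

-- A's loop state, over the list of memory values: count after scanning the rest
def pvCountAux : Int → Int → List Int → Int
  | _, count, [] => count
  | prev, count, x :: xs => pvCountAux x (if prev < x then count + 1 else 0) xs

-- length of the trailing strictly-increasing run (in steps)
def pvT : List Int → Int
  | [] => 0
  | x :: xs => if (x :: xs).Pairwise (· < ·) ∧ xs ≠ [] then (xs.length : Int) else pvT xs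

def pvAux : List Int → Int
  | [] => 0
  | m :: ms => pvCountAux m 0 ms

theorem pvCountAux_append (xs : List Int) (prev c y : Int) :
    pvCountAux prev c (xs ++ [y]) =
      if xs.getLastD prev < y then pvCountAux prev c xs + 1 else 0 := by
  induction xs generalizing prev c with
  | nil => simp [pvCountAux]
  | cons x xs ih => simp [pvCountAux, ih, List.getLast?_cons]

theorem pvT_cons (x : Int) (xs : List Int) :
    pvT (x :: xs) = if (x :: xs).Pairwise (· < ·) ∧ xs ≠ [] then (xs.length : Int) else pvT xs := rfl

theorem pvCountAux_eq (xs : List Int) (prev c : Int) :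
    pvCountAux prev c xs =
      if (prev :: xs).Pairwise (· < ·) then c + xs.length else pvT (prev :: xs) := by
  induction xs generalizing prev c with
  | nil => simp [pvCountAux]
  | cons x xs ih =>
    by_cases hpx : prev < x
    · by_cases hP : (x :: xs).Pairwise (· < ·)
      · have hP' : (prev :: x :: xs).Pairwise (· < ·) := by
          rw [List.pairwise_cons]
          refine ⟨?_, hP⟩
          intro a ha
          rcases List.mem_cons.mp ha with rfl | ha
          · exact hpx
          · exact lt_trans hpx ((List.pairwise_cons.mp hP).1 a ha)
        simp only [pvCountAux, ih, if_pos hP, if_pos hP']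
        simp [hpx]
        omega
      · have hP' : ¬ (prev :: x :: xs).Pairwise (· < ·) := fun h =>
          hP (List.pairwise_cons.mp h).2
        simp only [pvCountAux, ih, if_neg hP, if_neg hP']
        rw [pvT_cons prev (x :: xs), if_neg (show ¬((prev :: x :: xs).Pairwise (· < ·) ∧ (x :: xs) ≠ []) from fun h => hP' h.1)]
    · have hP' : ¬ (prev :: x :: xs).Pairwise (· < ·) := fun h =>
        hpx ((List.pairwise_cons.mp h).1 x (by simp))
      simp only [pvCountAux, ih, if_neg hpx, if_neg hP']
      rw [pvT_cons prev (x :: xs), if_neg (show ¬((prev :: x :: xs).Pairwise (· < ·) ∧ (x :: xs) ≠ []) from fun h => hP' h.1), pvT_cons x xs]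
      by_cases hP : (x :: xs).Pairwise (· < ·)
      · rcases eq_or_ne xs [] with rfl | hne
        · simp [hP, pvT]
        · simp [hP, hne]
      · simp [hP]

theorem pvAux_eq_T (ms : List Int) : pvAux ms = pvT ms := by
  cases ms with
  | nil => rfl
  | cons m rest =>
    rw [pvAux, pvCountAux_eq, pvT_cons]
    by_cases hP : (m :: rest).Pairwise (· < ·)
    · rcases eq_or_ne rest [] with rfl | hne
      · simp [hP, pvT]
      · simp [hP, hne]
    · simp [hP]

theorem pvT_ge3_iff (ms : List Int) :
    pvT ms ≥ 3 ↔ (4 ≤ ms.length ∧ (ms.drop (ms.length - 4)).Pairwise (· < ·)) := by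
  induction ms with
  | nil => simp [pvT]
  | cons x xs ih =>
    rw [pvT_cons]
    by_cases h : (x :: xs).Pairwise (· < ·) ∧ xs ≠ []
    · rw [if_pos h]
      constructor
      · intro h3
        exact ⟨by simp; omega, h.1.sublist (List.drop_sublist _ _)⟩
      · rintro ⟨h4, -⟩
        simp at h4 ⊢
        omega
    · rw [if_neg h, ih]
      rcases eq_or_ne xs [] with rfl | hne
      · simp
      · have hP : ¬ (x :: xs).Pairwise (· < ·) := fun hp => h ⟨hp, hne⟩
        by_cases h4 : 4 ≤ xs.length
        · have hdrop : (x :: xs).drop ((x :: xs).length - 4) = xs.drop (xs.length - 4) := by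
            rw [List.length_cons, show xs.length + 1 - 4 = (xs.length - 4) + 1 from by omega,
              List.drop_succ_cons]
          rw [hdrop, List.length_cons]
          exact and_congr_left' (by omega)
        · constructor
          · rintro ⟨a, -⟩
            exact (h4 a).elim
          · rintro ⟨a, hq⟩
            have h3 : xs.length = 3 := by simp at a; omega
            rw [show (x :: xs).drop ((x :: xs).length - 4) = x :: xs from by simp [h3]] at hq
            exact (hP hq).elim

theorem pvGetLastD_map (ds : List (List (String × Int))) (d0 : List (String × Int)) :
    (ds.map pvMu).getLastD (pvMu d0) = pvMu (ds.getLastD d0) := by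
  rw [List.getLastD_eq_getLast?, List.getLast?_map, List.getLastD_eq_getLast?]
  cases ds.getLast? <;> simp

theorem pvAux_append (m y : Int) (rest : List Int) :
    pvAux ((m :: rest) ++ [y]) =
      if rest.getLastD m < y then pvAux (m :: rest) + 1 else 0 := by
  simp only [List.cons_append, pvAux, pvCountAux_append]

theorem pvCount_eq (logs : List (List (String × Int))) :
    (PySem.List.pyRange 1 logs.length 1).foldl
      (fun count i =>
        let prev := PySem.List.pyGetD logs (i - 1) []
        let curr := PySem.List.pyGetD logs i []
        if pvMu prev < pvMu curr then count + 1 else 0) 0 = pvAux (logs.map pvMu) := by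
  induction logs using List.reverseRecOn with
  | nil =>
    rw [PySem.List.pyRange_one_eq_nil (by simp)]
    simp [pvAux]
  | append_singleton l x ih =>
    rcases l with _ | ⟨d0, ds⟩
    · rw [PySem.List.pyRange_one_eq_nil (by simp)]
      simp [pvAux, pvCountAux]
    · have hsub : ∀ j : Int, 0 ≤ j → j < ((d0 :: ds).length : Int) →
          PySem.List.pyGetD ((d0 :: ds) ++ [x]) j [] = PySem.List.pyGetD (d0 :: ds) j [] := by
        intro j h0 hj
        have hjn : j.toNat < (d0 :: ds).length := by
          simp only [List.length_cons] at hj ⊢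
          omega
        have hj' : j < ((((d0 :: ds) ++ [x]).length : Nat) : Int) := by
          simp only [List.length_append, List.length_cons] at hj ⊢
          push_cast
          omega
        rw [PySem.List.pyGetD_eq_getElem _ _ h0 hj',
            PySem.List.pyGetD_eq_getElem _ _ h0 hj]
        exact List.getElem_append_left hjn
      have hsplit : PySem.List.pyRange 1 (((d0 :: ds) ++ [x]).length) 1 =
          PySem.List.pyRange 1 ((d0 :: ds).length) 1 ++ [((d0 :: ds).length : Int)] := by
        have hc : ((((d0 :: ds) ++ [x]).length : Nat) : Int) = ((d0 :: ds).length : Int) + 1 := by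
          simp only [List.length_append, List.length_cons, List.length_nil]
          push_cast
          ring
        rw [hc, PySem.List.pyRange_one_succ_right (by simp)]
      rw [hsplit, List.foldl_append]
      have hpre : (PySem.List.pyRange 1 ((d0 :: ds).length) 1).foldl
          (fun count i =>
            let prev := PySem.List.pyGetD ((d0 :: ds) ++ [x]) (i - 1) []
            let curr := PySem.List.pyGetD ((d0 :: ds) ++ [x]) i []
            if pvMu prev < pvMu curr then count + 1 else 0) 0 = pvAux ((d0 :: ds).map pvMu) := by
        rw [PySem.List.foldl_congr_mem' _ _ (fun count i =>
            let prev := PySem.List.pyGetD (d0 :: ds) (i - 1) []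
            let curr := PySem.List.pyGetD (d0 :: ds) i []
            if pvMu prev < pvMu curr then count + 1 else 0) _ ?_]
        · exact ih
        · intro i hi acc
          obtain ⟨h1, h2⟩ := (PySem.List.mem_pyRange_one).mp hi
          simp only
          rw [hsub (i - 1) (by omega) (by omega), hsub i (by omega) h2]
      rw [hpre]
      simp only [List.foldl_cons, List.foldl_nil]
      have e_prev : PySem.List.pyGetD ((d0 :: ds) ++ [x]) (((d0 :: ds).length : Int) - 1) []
          = ds.getLastD d0 := by
        have hc : (((d0 :: ds).length : Int) - 1) = ((ds.length : Nat) : Int) := by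
          simp only [List.length_cons]
          push_cast
          ring
        rw [hc, PySem.List.pyGetD_natCast]
        have : ((d0 :: ds) ++ [x])[ds.length]? = some (ds.getLastD d0) := by
          rw [List.getElem?_append_left (by simp)]
          rw [show (d0 :: ds)[ds.length]? = (d0 :: ds).getLast? from by
            rw [List.getLast?_eq_getElem?]; simp]
          rw [List.getLast?_cons, List.getLastD_eq_getLast?]
        rw [List.getD_eq_getElem?_getD, this]
        rfl
      have e_curr : PySem.List.pyGetD ((d0 :: ds) ++ [x]) (((d0 :: ds).length : Int)) [] = x := by
        rw [PySem.List.pyGetD_natCast]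
        rw [List.getD_eq_getElem?_getD, List.getElem?_concat_length]
        rfl
      simp only [e_prev, e_curr]
      rw [show ((d0 :: ds) ++ [x]).map pvMu = (pvMu d0 :: ds.map pvMu) ++ [pvMu x] from by simp]
      rw [pvAux_append, pvGetLastD_map]
      simp

theorem pvLen4_decomp {α : Type} (t : List α) (h : t.length = 4) :
    ∃ a b c d, t = [a, b, c, d] := by
  rcases t with _ | ⟨a, _ | ⟨b, _ | ⟨c, _ | ⟨d, _ | ⟨e, t⟩⟩⟩⟩⟩ <;> simp_all

theorem detectA_eq (logs : List (List (String × Int))) :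
    detect_memory_leak logs = decide (pvT (logs.map pvMu) ≥ 3) := by
  simp only [detect_memory_leak]
  rw [pvCount_eq, pvAux_eq_T]
  split_ifs with h
  · exact (decide_eq_true h).symm
  · exact (decide_eq_false h).symm

theorem detectB_eq (logs : List (List (String × Int))) :
    detect_memory_leak_alt logs =
      decide (4 ≤ logs.length ∧
        ((logs.map pvMu).drop (logs.length - 4)).Pairwise (· < ·)) := by
  by_cases h4 : logs.length < 4
  · rw [detect_memory_leak_alt]
    rw [if_pos h4, decide_eq_false]
    rintro ⟨h, -⟩
    omega
  · have hlen4 : 4 ≤ logs.length := by omega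
    have hslice : PySem.List.slice logs (some (-4)) none =
        logs.drop (logs.length - 4) := by
      rw [PySem.List.slice_from_neg_ofNat logs 4 (by omega)]
    have hlen : (logs.drop (logs.length - 4)).length = 4 := by
      rw [List.length_drop]
      omega
    obtain ⟨a, b, c, d, hd⟩ := pvLen4_decomp _ hlen
    have hdm : (logs.map pvMu).drop (logs.length - 4) = [pvMu a, pvMu b, pvMu c, pvMu d] := by
      rw [← List.map_drop, hd]
      rfl
    have hiff : (4 ≤ logs.length ∧
        ([pvMu a, pvMu b, pvMu c, pvMu d] : List Int).Pairwise (· < ·)) ↔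
        (pvMu a < pvMu b ∧ (pvMu b < pvMu c ∧ pvMu c < pvMu d)) := by
      simp [List.pairwise_cons, hlen4]
      constructor
      · rintro ⟨⟨h1, -, -⟩, ⟨h2, -⟩, h3⟩
        exact ⟨h1, h2, h3⟩
      · rintro ⟨h1, h2, h3⟩
        exact ⟨⟨h1, by omega, by omega⟩, ⟨h2, by omega⟩, h3⟩
    rw [detect_memory_leak_alt]
    rw [if_neg h4]
    simp only [hslice, hd, hdm]
    rw [decide_eq_decide.mpr hiff, Bool.decide_and, Bool.decide_and]
    simp [Bool.and_assoc]

-- ===== VERDICT (by name: the statement is the Claim_ definition above) =====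
theorem detect_memory_leak_spec : Claim_equal_detect_memory_leak := by
  intro logs _ _
  unfold Spec_detect_memory_leak
  rw [detectA_eq, detectB_eq]
  apply decide_eq_decide.mpr
  simpa [List.length_map] using pvT_ge3_iff (logs.map pvMu)
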